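-- pv_equiv track=rewrite | github.com/Naoldaba/A2SV | week1/minimum-number-of-operations-to-move-all-balls-to-each-box.py | minOperations
-- ===== SOURCE A (Python) =====
-- from typing import List
--
-- def minOperations(boxes: str) -> List[int]:
--     result=[]
--     for i in range(len(boxes)):
--         count=0
--         for j in range(len(boxes)):
--             if i!=j and boxes[j]!="0":
--                 count+=abs(i-j)
--         result.append(count)
--     return result
-- ===== SOURCE B (Python) =====
-- from typing import List
--
-- def minOperations(boxes: str) -> List[int]:
--     def pass_costs(chars):
--         res = []
--         cnt = 0
--         ops = 0
--         for c in chars: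
--             res.append(ops)
--             cnt += c != "0"
--             ops += cnt
--         return res
--     left = pass_costs(boxes)
--     right = pass_costs(boxes[::-1])[::-1]
--     return [l + r for l, r in zip(left, right)]
-- ===== Notes on version B (the rewrite author's own statement) =====
-- stated objective: faster
-- what changed: Replaced the quadratic all-pairs distance scan by two linear prefix/suffix passes that carry a running ball count and running cost, combined per index.
import Mathlib
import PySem

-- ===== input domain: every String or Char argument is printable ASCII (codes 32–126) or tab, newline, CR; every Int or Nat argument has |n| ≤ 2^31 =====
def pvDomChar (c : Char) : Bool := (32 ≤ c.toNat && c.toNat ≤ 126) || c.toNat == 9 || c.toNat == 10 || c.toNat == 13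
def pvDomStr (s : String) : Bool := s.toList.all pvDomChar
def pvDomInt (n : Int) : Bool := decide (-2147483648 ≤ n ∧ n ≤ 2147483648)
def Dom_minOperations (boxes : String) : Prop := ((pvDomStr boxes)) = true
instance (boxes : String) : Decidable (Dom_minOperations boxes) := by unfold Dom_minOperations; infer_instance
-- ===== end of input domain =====

-- B replaces A's quadratic all-pairs distance scan by two linear prefix/suffix passes (objective: faster).

-- ===== PORT A =====
-- boxes[j] != "0" is ported as a character comparison on boxes.toList (exact: a 1-char Python string equals "0" iff the char is '0').
def minOperations (boxes : String) : List Int :=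
  (PySem.List.pyRange 0 (boxes.toList.length : Int) 1).foldl
    (fun result i =>
      result ++ [(PySem.List.pyRange 0 (boxes.toList.length : Int) 1).foldl
        (fun count j =>
          if i ≠ j ∧ PySem.List.pyGetD boxes.toList j '0' ≠ '0' then count + |i - j| else count) 0])
    []

-- ===== PORT B =====
-- pass_costs from Source B: walks the chars once, emitting the running cost then updating (cnt, ops).
def pvPassCosts : List Char → Int → Int → List Int
  | [], _cnt, _ops => []
  | c :: rest, cnt, ops =>
    let cnt' := cnt + (if c ≠ '0' then 1 else 0)
    ops :: pvPassCosts rest cnt' (ops + cnt')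

-- boxes[::-1] is List.reverse (PySem.Str.slice?_none_none_neg_one).
def minOperations_alt (boxes : String) : List Int :=
  ((pvPassCosts boxes.toList 0 0).zip ((pvPassCosts boxes.toList.reverse 0 0).reverse)).map
    (fun p => p.1 + p.2)

-- ===== PRECONDITION & SPEC =====
def Spec_minOperations (boxes : String) (out : List Int) : Prop := out = minOperations_alt boxes
instance (boxes : String) (out : List Int) : Decidable (Spec_minOperations boxes out) := by unfold Spec_minOperations; infer_instance

-- ===== CLAIM (what is proved, stated in full; the proofs are below) =====
def Claim_equal_minOperations : Prop := ∀ (boxes : String), Dom_minOperations boxes → Spec_minOperations boxes (minOperations boxes)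

-- ===== LEMMAS AND PROOFS =====

-- One-sided cost sum: pvW cs i = Σ_{j<i, cs[j]≠'0'} (i - j).
def pvW (cs : List Char) (i : Nat) : Int :=
  ∑ j ∈ Finset.range i, (if cs.getD j '0' ≠ '0' then (i : Int) - j else 0)

theorem pvW_zero (cs : List Char) : pvW cs 0 = 0 := by simp [pvW]

theorem pvW_cons (c : Char) (cs : List Char) (i : Nat) :
    pvW (c :: cs) (i + 1) = (if c ≠ '0' then ((i : Int) + 1) else 0) + pvW cs i := by
  unfold pvW
  rw [Finset.sum_range_succ']
  simp only [List.getD_cons_succ, List.getD_cons_zero, Nat.cast_add, Nat.cast_one,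
    Nat.cast_zero, sub_zero]
  have h : ∀ j ∈ Finset.range i,
      (if cs.getD j '0' ≠ '0' then (i : Int) + 1 - ((j : Int) + 1) else 0)
        = (if cs.getD j '0' ≠ '0' then (i : Int) - j else 0) := by
    intro j _; split_ifs <;> ring
  rw [Finset.sum_congr rfl h]
  split_ifs <;> ring

theorem pvPassCosts_length (cs : List Char) (cnt ops : Int) :
    (pvPassCosts cs cnt ops).length = cs.length := by
  induction cs generalizing cnt ops with
  | nil => rfl
  | cons c rest ih => simp [pvPassCosts, ih]

theorem pvPassCosts_get (cs : List Char) (cnt ops : Int) (i : Nat) (h : i < cs.length) :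
    (pvPassCosts cs cnt ops)[i]'(by rw [pvPassCosts_length]; exact h)
      = ops + cnt * i + pvW cs i := by
  induction cs generalizing cnt ops i with
  | nil => simp at h
  | cons c rest ih =>
    cases i with
    | zero => simp [pvPassCosts, pvW_zero]
    | succ i =>
      have hi : i < rest.length := by simpa using h
      simp only [pvPassCosts, List.getElem_cons_succ]
      rw [ih _ _ i hi, pvW_cons]
      split_ifs <;> push_cast <;> ring

theorem foldl_ite_add {α : Type} (l : List α) (P : α → Prop) [DecidablePred P] (v : α → Int)
    (init : Int) :
    l.foldl (fun c x => if P x then c + v x else c) init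
      = init + (l.map (fun x => if P x then v x else 0)).sum := by
  induction l generalizing init with
  | nil => simp
  | cons x xs ih => simp only [List.foldl_cons, List.map_cons, List.sum_cons, ih]; split_ifs <;> ring

theorem sum_map_range_eq (n : Nat) (f : Nat → Int) :
    ((List.range n).map f).sum = ∑ j ∈ Finset.range n, f j := by
  induction n with
  | zero => simp
  | succ n ih => rw [List.range_succ, Finset.sum_range_succ, List.map_append]; simp [ih]

theorem pyRange_cast (n : Nat) :
    PySem.List.pyRange 0 (n : Int) 1 = (List.range n).map (fun k : Nat => (k : Int)) := by
  rw [PySem.List.pyRange_one]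
  simp

theorem minOperations_eq_map (boxes : String) :
    minOperations boxes = (List.range boxes.toList.length).map (fun i : Nat =>
      ∑ j ∈ Finset.range boxes.toList.length,
        (if (i : Int) ≠ (j : Int) ∧ boxes.toList.getD j '0' ≠ '0'
         then |(i : Int) - (j : Int)| else 0)) := by
  unfold minOperations
  rw [pyRange_cast, PySem.List.foldl_append_singleton_eq_map, List.map_map]
  refine List.map_congr_left (fun i _ => ?_)
  simp only [Function.comp_apply]
  rw [List.foldl_map,
    foldl_ite_add (List.range boxes.toList.length)
      (fun k : Nat => (i : Int) ≠ (k : Int) ∧ PySem.List.pyGetD boxes.toList (k : Int) '0' ≠ '0')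
      (fun k : Nat => |(i : Int) - (k : Int)|) 0,
    zero_add, sum_map_range_eq]
  refine Finset.sum_congr rfl (fun j _ => ?_)
  simp [PySem.List.pyGetD_natCast]

theorem sum_split (cs : List Char) (i : Nat) (h : i < cs.length) :
    (∑ j ∈ Finset.range cs.length,
        (if (i : Int) ≠ (j : Int) ∧ cs.getD j '0' ≠ '0' then |(i : Int) - (j : Int)| else 0))
      = pvW cs i + pvW cs.reverse (cs.length - 1 - i) := by
  set n := cs.length with hn
  have h1 : (∑ j ∈ Finset.range i,
      (if (i : Int) ≠ (j : Int) ∧ cs.getD j '0' ≠ '0' then |(i : Int) - (j : Int)| else 0))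
      = pvW cs i := by
    refine Finset.sum_congr rfl (fun j hj => ?_)
    have hj' : j < i := Finset.mem_range.mp hj
    have hne : (i : Int) ≠ (j : Int) := by omega
    have habs : |(i : Int) - (j : Int)| = (i : Int) - j := abs_of_nonneg (by omega)
    simp [hne, habs]
  have h2 : (∑ j ∈ Finset.Ico (i + 1) n,
      (if (i : Int) ≠ (j : Int) ∧ cs.getD j '0' ≠ '0' then |(i : Int) - (j : Int)| else 0))
      = pvW cs.reverse (n - 1 - i) := by
    unfold pvW
    refine Finset.sum_nbij' (fun j => n - 1 - j) (fun k => n - 1 - k) ?_ ?_ ?_ ?_ ?_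
    · intro j hj; simp only [Finset.mem_Ico] at hj; simp only [Finset.mem_range]; omega
    · intro k hk; simp only [Finset.mem_range] at hk; simp only [Finset.mem_Ico]; omega
    · intro j hj; simp only [Finset.mem_Ico] at hj; show n - 1 - (n - 1 - j) = j; omega
    · intro k hk; simp only [Finset.mem_range] at hk; show n - 1 - (n - 1 - k) = k; omega
    · intro j hj
      simp only [Finset.mem_Ico] at hj
      have hne : (i : Int) ≠ (j : Int) := by omega
      have hget : cs.reverse.getD (n - 1 - j) '0' = cs.getD j '0' := by
        rw [List.getD_eq_getElem cs.reverse _ (by rw [List.length_reverse, ← hn]; omega),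
            List.getD_eq_getElem cs _ (by omega)]
        rw [List.getElem_reverse]
        congr 1
        rw [← hn]; omega
      have habs : |(i : Int) - (j : Int)| = ((n - 1 - i : Nat) : Int) - ((n - 1 - j : Nat) : Int) := by
        rw [abs_sub_comm, abs_of_nonneg (by omega)]; omega
      rw [List.getD_eq_getElem?_getD, List.getD_eq_getElem?_getD] at hget
      simp [hget, hne, habs]
  have hsplit : Finset.range n = Finset.range i ∪ Finset.Ico i n := by
    simp only [Finset.range_eq_Ico]
    exact (Finset.Ico_union_Ico_eq_Ico (by omega) (by omega)).symm
  rw [hsplit, Finset.sum_union (by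
    simp only [Finset.range_eq_Ico]; exact Finset.Ico_disjoint_Ico_consecutive 0 i n)]
  rw [Finset.sum_eq_sum_Ico_succ_bot (by omega)]
  simp only [ne_eq, not_true_eq_false, false_and, if_false, zero_add]
  rw [h1, h2]

-- ===== VERDICT (by name: the statement is the Claim_ definition above) =====
theorem minOperations_spec : Claim_equal_minOperations := by
  intro boxes _
  unfold Spec_minOperations minOperations_alt
  rw [minOperations_eq_map]
  apply List.ext_getElem
  · simp [pvPassCosts_length]
  · intro i hA hB
    have hi : i < boxes.toList.length := by simpa using hA
    simp only [List.getElem_map, List.getElem_range, List.getElem_zip]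
    rw [sum_split boxes.toList i hi]
    rw [pvPassCosts_get boxes.toList 0 0 i hi]
    have hrl : (pvPassCosts boxes.toList.reverse 0 0).length = boxes.toList.length := by
      rw [pvPassCosts_length, List.length_reverse]
    have hrevget : ((pvPassCosts boxes.toList.reverse 0 0).reverse)[i]'(by
          rw [List.length_reverse, hrl]; exact hi)
        = pvW boxes.toList.reverse (boxes.toList.length - 1 - i) := by
      rw [List.getElem_reverse]
      have hlt : (pvPassCosts boxes.toList.reverse 0 0).length - 1 - i
          < boxes.toList.reverse.length := by
        rw [hrl, List.length_reverse]; omega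
      rw [pvPassCosts_get boxes.toList.reverse 0 0 _ hlt]
      rw [hrl]
      ring_nf
    rw [hrevget]
    ring
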